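-- pv_equiv track=rewrite | github.com/juandarr/advent-of-code | 2022/day6/day6-2.py | checkMarkerLocation
-- ===== SOURCE A (Python) =====
-- def checkMarkerLocation(nCharacters,stream):
--     distinctCharacters = nCharacters
--     idx = 0
--     currentStarter = {}
--     # Store fist nCharacters in hash map
--     while (idx<distinctCharacters):
--         k = stream[idx]
--         if k in currentStarter:
--             currentStarter[k] += 1
--         else:
--             currentStarter[k] = 1
--         idx +=1
--     # While unique consecutive characters is different from distinctCharacters
--     while (len(currentStarter)<distinctCharacters):
--         # Remove last character in sequence to count the next one
--         k = stream[idx-distinctCharacters]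
--         if (currentStarter[k]>1):
--             currentStarter[k] -= 1
--         else:
--             currentStarter.pop(k)
--         # Count next character
--         k = stream[idx]
--         if k in currentStarter:
--             currentStarter[k]+=1
--         else:
--             currentStarter[k]=1
--         idx +=1
--     return idx
-- ===== SOURCE B (Python) =====
-- def checkMarkerLocation(nCharacters, stream):
--     idx = 0
--     window = []
--     # naive sliding window: recompute distinctness from scratch each step
--     while len(set(window)) < nCharacters:
--         window.append(stream[idx])
--         if len(window) > nCharacters:
--             window.pop(0)
--         idx += 1
--     return idx
-- ===== Notes on version B (the rewrite author's own statement) =====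
-- stated objective: simpler
-- what changed: Replaces A's two-phase incremental count-dict (prefill loop plus decrement/pop sliding loop) with a single naive loop that keeps the current window as a list and recomputes its distinct count with set() each step.
import Mathlib
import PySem

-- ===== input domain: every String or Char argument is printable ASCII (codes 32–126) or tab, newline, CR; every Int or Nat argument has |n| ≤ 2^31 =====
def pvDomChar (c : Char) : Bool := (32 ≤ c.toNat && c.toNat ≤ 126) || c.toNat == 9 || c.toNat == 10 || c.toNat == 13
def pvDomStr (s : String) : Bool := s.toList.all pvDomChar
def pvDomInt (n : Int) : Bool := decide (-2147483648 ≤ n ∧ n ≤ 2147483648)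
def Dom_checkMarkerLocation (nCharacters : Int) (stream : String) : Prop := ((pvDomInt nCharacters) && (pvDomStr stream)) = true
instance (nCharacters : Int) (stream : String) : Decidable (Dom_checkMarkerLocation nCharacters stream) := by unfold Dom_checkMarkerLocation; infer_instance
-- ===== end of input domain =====

-- B replaces A's two-phase incremental count-dict with a single naive sliding-window loop
-- that recomputes the window's distinct count with set() each step (simpler, not faster).

-- ===== PORT A =====
-- 'if k in d: d[k] += 1 else: d[k] = 1' (the lookup d[k] always succeeds when contains is true)
def pvIncr (d : PySem.Dict Char Int) (k : Char) : PySem.Dict Char Int :=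
  if d.contains k then d.insert k (d.getD k 0 + 1) else d.insert k 1

-- first while loop: 'while idx < distinctCharacters: count stream[idx]; idx += 1'
-- pyGet? = none models Python's IndexError (those inputs are outside Pre_)
def pvFill (cs : List Char) (n : Nat) (idx : Nat) (d : PySem.Dict Char Int) :
    Option (PySem.Dict Char Int) :=
  if _h : idx < n then
    match PySem.List.pyGet? cs (idx : Int) with
    | none => none
    | some k => pvFill cs n (idx + 1) (pvIncr d k)
  else some d
termination_by n - idx

-- second while loop; fuel is only a totality device (exhaustion / IndexError return idx, outside Pre_).
-- 'currentStarter[k] > 1' is ported as 'd.getD k 0 > 1': inside Pre_ the key is always present.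
def pvScan (cs : List Char) (n : Int) (fuel : Nat) (d : PySem.Dict Char Int) (idx : Nat) : Int :=
  match fuel with
  | 0 => idx
  | fuel + 1 =>
    if (d.size : Int) < n then
      match PySem.List.pyGet? cs ((idx : Int) - n) with
      | none => idx
      | some k1 =>
        let d1 := if d.getD k1 0 > 1 then d.insert k1 (d.getD k1 0 - 1) else d.erase k1
        match PySem.List.pyGet? cs (idx : Int) with
        | none => idx
        | some k2 => pvScan cs n fuel (pvIncr d1 k2) (idx + 1)
    else idx

def checkMarkerLocation (nCharacters : Int) (stream : String) : Int :=
  let cs := stream.toList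
  match pvFill cs nCharacters.toNat 0 PySem.Dict.empty with
  | none => 0   -- Python raises IndexError here (outside Pre_)
  | some d => pvScan cs nCharacters (cs.length + 1 - nCharacters.toNat) d nCharacters.toNat

-- ===== PORT B =====
-- single loop: 'while len(set(window)) < nCharacters: append stream[idx]; pop front if too long; idx += 1'
def pvSlide (cs : List Char) (n : Int) (fuel : Nat) (w : List Char) (idx : Nat) : Int :=
  match fuel with
  | 0 => idx
  | fuel + 1 =>
    if ((PySem.Set.ofList w).length : Int) < n then
      match PySem.List.pyGet? cs (idx : Int) with
      | none => idx   -- Python raises IndexError here (outside Pre_)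
      | some c =>
        let w1 := w ++ [c]
        let w2 := if (w1.length : Int) > n then w1.drop 1 else w1
        pvSlide cs n fuel w2 (idx + 1)
    else idx

def checkMarkerLocation_alt (nCharacters : Int) (stream : String) : Int :=
  pvSlide stream.toList nCharacters (stream.toList.length + 1) [] 0

-- ===== PRECONDITION & SPEC =====
-- Pre_ excludes exactly the inputs where A raises IndexError (stream shorter than nCharacters,
-- or no all-distinct window of length nCharacters exists); B raises there too.
def Pre_checkMarkerLocation (nCharacters : Int) (stream : String) : Prop :=
  nCharacters ≤ 0 ∨
    ∃ i ∈ List.range (stream.toList.length + 1),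
      nCharacters ≤ (i : Int) ∧
      ((stream.toList.drop (i - nCharacters.toNat)).take nCharacters.toNat).Nodup
instance (nCharacters : Int) (stream : String) : Decidable (Pre_checkMarkerLocation nCharacters stream) := by unfold Pre_checkMarkerLocation; infer_instance

def pvWitness_checkMarkerLocation : Int × String := (4, "abccdefg")

def Spec_checkMarkerLocation (nCharacters : Int) (stream : String) (out : Int) : Prop := out = checkMarkerLocation_alt nCharacters stream
instance (nCharacters : Int) (stream : String) (out : Int) : Decidable (Spec_checkMarkerLocation nCharacters stream out) := by unfold Spec_checkMarkerLocation; infer_instance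

-- ===== CLAIM (what is proved, stated in full; the proofs are below) =====
def Claim_equal_checkMarkerLocation : Prop := ∀ (nCharacters : Int) (stream : String), Dom_checkMarkerLocation nCharacters stream → Pre_checkMarkerLocation nCharacters stream → Spec_checkMarkerLocation nCharacters stream (checkMarkerLocation nCharacters stream)

-- ===== LEMMAS AND PROOFS =====

-- the invariant tying A's count-dict to the current window of characters
def pvInv (d : PySem.Dict Char Int) (w : List Char) : Prop :=
  d.keys.Nodup ∧ ∀ k, d.get? k = if 0 < w.count k then some ((w.count k : Int)) else none

theorem pv_get?_erase (d : PySem.Dict Char Int) (k k' : Char) :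
    (d.erase k).get? k' = if k' = k then none else d.get? k' := by
  obtain ⟨items⟩ := d
  induction items with
  | nil => simp [PySem.Dict.erase, PySem.Dict.get?]
  | cons p rest ih =>
    simp only [PySem.Dict.erase, PySem.Dict.get?, List.filter_cons] at *
    by_cases hpk : p.1 = k <;> by_cases hpk' : p.1 = k' <;> simp_all

theorem pv_nodup_keys_erase (d : PySem.Dict Char Int) (k : Char) (h : d.keys.Nodup) :
    (d.erase k).keys.Nodup := by
  have hs : (d.erase k).items.Sublist d.items := List.filter_sublist
  exact (hs.map Prod.fst).nodup h

theorem pvInv_incr (d : PySem.Dict Char Int) (w : List Char) (c : Char) (h : pvInv d w) :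
    pvInv (pvIncr d c) (w ++ [c]) := by
  obtain ⟨hnd, hget⟩ := h
  have hc := hget c
  unfold pvIncr
  rw [PySem.Dict.contains_eq_isSome_get?, hc]
  by_cases hmem : 0 < w.count c
  · simp only [hmem, if_pos, Option.isSome_some]
    refine ⟨PySem.Dict.nodup_keys_insert _ _ _ hnd, fun k => ?_⟩
    rw [PySem.Dict.get?_insert, PySem.Dict.getD_eq_get?_getD, hc]
    simp only [hmem, if_pos, Option.getD_some]
    by_cases hk : k = c
    · subst hk; simp [List.count_append]
    · have hk' : ¬ c = k := fun hx => hk hx.symm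
      simp [List.count_append, hget k, hk, hk']
  · simp only [hmem, if_false, Option.isSome_none, Bool.false_eq_true]
    refine ⟨PySem.Dict.nodup_keys_insert _ _ _ hnd, fun k => ?_⟩
    rw [PySem.Dict.get?_insert]
    by_cases hk : k = c
    · subst hk; simp [List.count_append]; omega
    · have hk' : ¬ c = k := fun hx => hk hx.symm
      simp [List.count_append, hget k, hk, hk']

theorem pvInv_dec (d : PySem.Dict Char Int) (c : Char) (t : List Char) (h : pvInv d (c :: t)) :
    pvInv (if d.getD c 0 > 1 then d.insert c (d.getD c 0 - 1) else d.erase c) t := by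
  obtain ⟨hnd, hget⟩ := h
  have hgd : d.getD c 0 = (t.count c : Int) + 1 := by
    rw [PySem.Dict.getD_eq_get?_getD, hget c]
    simp
  by_cases hpos : 0 < t.count c
  · rw [if_pos (by rw [hgd]; omega)]
    refine ⟨PySem.Dict.nodup_keys_insert _ _ _ hnd, fun k => ?_⟩
    rw [PySem.Dict.get?_insert]
    by_cases hk : k = c
    · subst hk; simp [hpos, hgd]
    · have hk' : ¬ c = k := fun hx => hk hx.symm
      simp [hk, hget k, hk']
  · rw [if_neg (by rw [hgd]; omega)]
    refine ⟨pv_nodup_keys_erase _ _ hnd, fun k => ?_⟩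
    rw [pv_get?_erase]
    by_cases hk : k = c
    · subst hk; simp [Nat.eq_zero_of_not_pos hpos]
    · have hk' : ¬ c = k := fun hx => hk hx.symm
      simp [hk, hget k, hk']

theorem pvInv_size (d : PySem.Dict Char Int) (w : List Char) (h : pvInv d w) :
    d.size = (PySem.Set.ofList w).length := by
  obtain ⟨hnd, hget⟩ := h
  have hmem : ∀ k, k ∈ d.keys ↔ k ∈ PySem.Set.ofList w := by
    intro k
    rw [PySem.Set.mem_ofList]
    constructor
    · intro hkm
      by_contra hnw
      have : d.get? k = none := by
        rw [hget k]
        simp [List.count_eq_zero_of_not_mem hnw]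
      exact ((PySem.Dict.get?_eq_none_iff_not_mem_keys d k).mp this) hkm
    · intro hw
      have hcp : 0 < w.count k := List.count_pos_iff.mpr hw
      by_contra hkm
      have hnone := (PySem.Dict.get?_eq_none_iff_not_mem_keys d k).mpr hkm
      rw [hget k, if_pos hcp] at hnone
      simp at hnone
  have hperm := (List.perm_ext_iff_of_nodup hnd (PySem.Set.nodup_ofList w)).mpr hmem
  simpa [PySem.Dict.size, PySem.Dict.keys] using hperm.length_eq

theorem pvInv_foldl (l : List Char) : ∀ d w, pvInv d w → pvInv (l.foldl pvIncr d) (w ++ l) := by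
  induction l with
  | nil => simp
  | cons c t ih =>
    intro d w h
    have := ih (pvIncr d c) (w ++ [c]) (pvInv_incr d w c h)
    simpa using this

theorem pvFill_eq (cs : List Char) (nn : Nat) (hn : nn ≤ cs.length) :
    ∀ m j d, nn - j = m → j ≤ nn →
      pvFill cs nn j d = some (((cs.drop j).take (nn - j)).foldl pvIncr d) := by
  intro m
  induction m with
  | zero =>
    intro j d hm hle
    have hjn : j = nn := by omega
    subst hjn
    rw [pvFill]
    simp
  | succ m ih =>
    intro j d hm hle
    have hjlt : j < nn := by omega
    have hjcs : j < cs.length := by omega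
    have hget : PySem.List.pyGet? cs (j : Int) = some cs[j] := by
      rw [PySem.List.pyGet?_natCast, List.getElem?_eq_getElem hjcs]
    rw [pvFill, dif_pos hjlt]
    simp only [hget]
    rw [ih (j + 1) (pvIncr d cs[j]) (by omega) (by omega)]
    have hslice : (cs.drop j).take (nn - j) = cs[j] :: (cs.drop (j + 1)).take (nn - (j + 1)) := by
      rw [List.drop_eq_getElem_cons hjcs]
      rw [List.take_cons (by omega : 0 < nn - j)]
      have : nn - j - 1 = nn - (j + 1) := by omega
      rw [this]
    rw [hslice, List.foldl_cons]

theorem pvSlide_warmup (cs : List Char) (n : Int) (nn : Nat) (hnn : nn = n.toNat)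
    (hn1 : 1 ≤ n) (hlen : nn ≤ cs.length) :
    ∀ m j, nn - j = m → j ≤ nn → pvSlide cs n (cs.length + 1 - j) (cs.take j) j
      = pvSlide cs n (cs.length + 1 - nn) (cs.take nn) nn := by
  have hncast : (nn : Int) = n := by omega
  intro m
  induction m with
  | zero =>
    intro j hm hle
    have : j = nn := by omega
    rw [this]
  | succ m ih =>
    intro j hm hle
    have hjlt : j < nn := by omega
    have hjcs : j < cs.length := by omega
    have hfuel : cs.length + 1 - j = (cs.length + 1 - (j + 1)) + 1 := by omega
    rw [hfuel, pvSlide]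
    have hcond : ((PySem.Set.ofList (cs.take j)).length : Int) < n := by
      have h1 := PySem.Set.length_ofList_le (cs.take j)
      have h2 : (cs.take j).length = j := by simp; omega
      omega
    rw [if_pos hcond]
    have hget : PySem.List.pyGet? cs (j : Int) = some cs[j] := by
      rw [PySem.List.pyGet?_natCast, List.getElem?_eq_getElem hjcs]
    simp only [hget]
    have hw1 : cs.take j ++ [cs[j]] = cs.take (j + 1) := by
      rw [List.take_add_one, List.getElem?_eq_getElem hjcs]
      rfl
    have hlen1 : ((cs.take j ++ [cs[j]]).length : Int) = (j : Int) + 1 := by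
      simp; omega
    have hnotpop : ¬ (((cs.take j ++ [cs[j]]).length : Int) > n) := by
      rw [hlen1]; omega
    rw [if_neg hnotpop, hw1]
    exact ih (j + 1) (by omega) (by omega)

theorem pv_main (cs : List Char) (n : Int) (nn : Nat) (hnn : nn = n.toNat) (hn1 : 1 ≤ n) :
    ∀ fuel idx d, nn ≤ idx → idx ≤ cs.length → pvInv d ((cs.drop (idx - nn)).take nn) →
      pvScan cs n fuel d idx = pvSlide cs n fuel ((cs.drop (idx - nn)).take nn) idx := by
  have hnn1 : 1 ≤ nn := by omega
  intro fuel
  induction fuel with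
  | zero => intro idx d _ _ _; rfl
  | succ f ih =>
    intro idx d hni hil hinv
    have hwlen : ((cs.drop (idx - nn)).take nn).length = nn := by
      simp
      omega
    rw [pvScan, pvSlide, pvInv_size d _ hinv]
    by_cases hcond : (((PySem.Set.ofList ((cs.drop (idx - nn)).take nn)).length : Int) < n)
    · rw [if_pos hcond, if_pos hcond]
      have hidx1 : idx - nn < cs.length := by omega
      have harg : (idx : Int) - n = ((idx - nn : Nat) : Int) := by omega
      have hget1 : PySem.List.pyGet? cs ((idx : Int) - n) = some cs[idx - nn] := by
        rw [harg, PySem.List.pyGet?_natCast, List.getElem?_eq_getElem hidx1]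
      simp only [hget1]
      have hw : (cs.drop (idx - nn)).take nn
          = cs[idx - nn] :: ((cs.drop (idx - nn + 1)).take (nn - 1)) := by
        rw [List.drop_eq_getElem_cons hidx1, List.take_cons (by omega : 0 < nn)]
      by_cases hidx : idx < cs.length
      · have hget2 : PySem.List.pyGet? cs (idx : Int) = some cs[idx] := by
          rw [PySem.List.pyGet?_natCast, List.getElem?_eq_getElem hidx]
        simp only [hget2]
        have hpop : (((cs.drop (idx - nn)).take nn ++ [cs[idx]]).length : Int) > n := by
          simp only [List.length_append, List.length_cons, hwlen]
          simp
          omega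
        rw [if_pos hpop]
        have hdrop1 : ((cs.drop (idx - nn)).take nn ++ [cs[idx]]).drop 1
            = (cs.drop (idx - nn + 1)).take (nn - 1) ++ [cs[idx]] := by
          rw [hw]
          rfl
        rw [hdrop1]
        have hinv1 : pvInv d (cs[idx - nn] :: ((cs.drop (idx - nn + 1)).take (nn - 1))) := by
          rw [← hw]; exact hinv
        have hinv2 := pvInv_incr _ _ cs[idx] (pvInv_dec d _ _ hinv1)
        have hslice : (cs.drop (idx + 1 - nn)).take nn
            = (cs.drop (idx - nn + 1)).take (nn - 1) ++ [cs[idx]] := by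
          have h1 : idx + 1 - nn = idx - nn + 1 := by omega
          rw [h1]
          set m := idx - nn + 1 with hm
          conv_lhs => rw [show nn = (nn - 1) + 1 by omega]
          rw [List.take_add_one, List.getElem?_drop]
          have h3 : m + (nn - 1) = idx := by omega
          rw [h3, List.getElem?_eq_getElem hidx]
          rfl
        rw [← hslice] at hinv2 ⊢
        exact ih (idx + 1) _ (by omega) (by omega) hinv2
      · have hget2 : PySem.List.pyGet? cs (idx : Int) = none := by
          rw [PySem.List.pyGet?_natCast, List.getElem?_eq_none_iff.mpr (by omega)]
        simp only [hget2]
    · rw [if_neg hcond, if_neg hcond]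

-- ===== VERDICT (by name: the statement is the Claim_ definition above) =====
theorem checkMarkerLocation_spec : Claim_equal_checkMarkerLocation := by
  intro n s _hdom hpre
  unfold Spec_checkMarkerLocation
  unfold checkMarkerLocation checkMarkerLocation_alt
  rw [Pre_checkMarkerLocation] at hpre
  by_cases hn : n ≤ 0
  · have h0 : n.toNat = 0 := by omega
    have hfill : pvFill s.toList n.toNat 0 PySem.Dict.empty = some PySem.Dict.empty := by
      rw [h0, pvFill]; simp
    simp only [hfill]
    simp only [h0, Nat.sub_zero]
    rw [pvScan, pvSlide]
    have hc : ¬ ((0 : Int) < n) := by omega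
    simp [PySem.Dict.size_empty, hc, PySem.Set.ofList]
  · rcases hpre with h | ⟨i, hir, hin, _hnd⟩
    · omega
    have hilen : i ≤ s.toList.length := by have := List.mem_range.mp hir; omega
    have hnnlen : n.toNat ≤ s.toList.length := by omega
    have hfill := pvFill_eq s.toList n.toNat hnnlen (n.toNat - 0) 0 PySem.Dict.empty rfl (by omega)
    simp only [List.drop_zero, Nat.sub_zero] at hfill
    simp only [hfill]
    have hinv0 : pvInv PySem.Dict.empty [] := by
      refine ⟨?_, fun k => ?_⟩
      · exact PySem.Dict.nodup_keys_empty
      · simp [PySem.Dict.get?_empty]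
    have hinvd : pvInv ((s.toList.take n.toNat).foldl pvIncr PySem.Dict.empty) (s.toList.take n.toNat) := by
      simpa using pvInv_foldl (s.toList.take n.toNat) PySem.Dict.empty [] hinv0
    have hmain := pv_main s.toList n n.toNat rfl (by omega)
      (s.toList.length + 1 - n.toNat) n.toNat _ le_rfl hnnlen
      (by simpa [Nat.sub_self] using hinvd)
    have hwarm := pvSlide_warmup s.toList n n.toNat rfl (by omega) hnnlen n.toNat 0 (by omega) (by omega)
    simp only [Nat.sub_self, List.drop_zero] at hmain
    simp only [List.take_zero, Nat.sub_zero] at hwarm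
    rw [hmain, ← hwarm]
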